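-- pv_equiv track=rewrite | github.com/raeez/chiral-bar-cobar | compute/lib/factorization_homology_genus_engine.py | _enumerate_integrable_weights_general
-- ===== SOURCE A (Python) =====
-- from typing import Dict, List, Optional, Tuple
--
-- def _get_comarks(type_: str, rank: int) -> List[int]:
--     """Comarks (marks of the coaffine/dual affine Dynkin diagram).
--
--     For simply-laced types, comarks = marks.
--     The level condition is: sum_i a_i^v * m_i <= k.
--     """
--     # FINITE comarks a_i^v (i = 1, ..., rank) from the affine Dynkin diagram.
--     # Source: Kac, "Infinite-dimensional Lie algebras", Tables Aff 1-3.
--     # These are the comarks of the FINITE nodes only (excluding the affine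
--     # node a_0^v = 1).  The level condition is: sum_i a_i^v * m_i <= k.
--     # Consistency check: sum of finite comarks = h^v - 1 (since a_0^v = 1).
--     if type_ == "A":
--         return [1] * rank  # A_n^(1): all comarks 1; h^v = rank + 1
--     elif type_ == "B":
--         # B_n^(1): a_0^v=1, a_1^v=1, a_2^v=2, ..., a_{n-1}^v=2, a_n^v=1
--         # Finite: [1, 2, 2, ..., 2, 1] with (rank - 2) copies of 2
--         if rank == 2:
--             return [1, 1]  # B_2: h^v = 3, finite sum = 2
--         return [1] + [2] * (rank - 2) + [1]
--     elif type_ == "C":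
--         # C_n^(1): all comarks 1 (including affine)
--         # Finite: [1, 1, ..., 1]; h^v = n + 1
--         return [1] * rank
--     elif type_ == "D":
--         # D_n^(1): a_0^v=1, a_1^v=1, a_2^v=2, ..., a_{n-2}^v=2, a_{n-1}^v=1, a_n^v=1
--         if rank == 4:
--             return [1, 2, 1, 1]  # D_4: h^v = 6, finite sum = 5
--         return [1] + [2] * (rank - 3) + [1, 1]
--     elif type_ == "G" and rank == 2:
--         # G_2^(1): marks (1, 2, 3), comarks (1, 2, 1); h^v = 4
--         # Finite comarks: [2, 1]
--         return [2, 1]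
--     elif type_ == "F" and rank == 4:
--         # F_4^(1): comarks (1, 2, 3, 2, 1); h^v = 9
--         # Finite comarks: [2, 3, 2, 1]
--         return [2, 3, 2, 1]
--     elif type_ == "E" and rank == 6:
--         # E_6^(1): comarks (1, 1, 2, 3, 2, 1, 2); h^v = 12
--         # Finite: [1, 2, 3, 2, 1, 2]
--         return [1, 2, 3, 2, 1, 2]
--     elif type_ == "E" and rank == 7:
--         # E_7^(1): comarks (1, 2, 3, 4, 3, 2, 1, 2); h^v = 18
--         # Finite: [2, 3, 4, 3, 2, 1, 2]
--         return [2, 3, 4, 3, 2, 1, 2]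
--     elif type_ == "E" and rank == 8:
--         # E_8^(1): simply-laced, comarks = marks = (1, 2, 3, 4, 5, 6, 4, 2, 3)
--         # h^v = h = 30; finite: [2, 3, 4, 5, 6, 4, 2, 3]
--         return [2, 3, 4, 5, 6, 4, 2, 3]
--     else:
--         raise ValueError(f"Comarks not available for {type_}{rank}")
--
-- def _enumerate_integrable_weights_general(type_: str, rank: int,
--                                            k: int) -> List[List[int]]:
--     """Enumerate integrable highest weights for general type at level k.
--
--     Returns list of Dynkin label tuples [m_1, ..., m_rank] with
--     sum_i a_i^v * m_i <= k.
--     """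
--     comarks = _get_comarks(type_, rank)
--     weights = []
--
--     def _recurse(depth, remaining, current):
--         if depth == rank:
--             weights.append(list(current))
--             return
--         cm = comarks[depth]
--         for m in range(remaining // cm + 1):
--             _recurse(depth + 1, remaining - cm * m, current + [m])
--
--     _recurse(0, k, [])
--     return weights
-- ===== SOURCE B (Python) =====
-- from typing import Dict, List, Optional, Tuple
--
-- def _get_comarks(type_: str, rank: int) -> List[int]:
--     if type_ == "A":
--         return [1] * rank
--     elif type_ == "B":
--         if rank == 2:
--             return [1, 1]
--         return [1] + [2] * (rank - 2) + [1]
--     elif type_ == "C":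
--         return [1] * rank
--     elif type_ == "D":
--         if rank == 4:
--             return [1, 2, 1, 1]
--         return [1] + [2] * (rank - 3) + [1, 1]
--     elif type_ == "G" and rank == 2:
--         return [2, 1]
--     elif type_ == "F" and rank == 4:
--         return [2, 3, 2, 1]
--     elif type_ == "E" and rank == 6:
--         return [1, 2, 3, 2, 1, 2]
--     elif type_ == "E" and rank == 7:
--         return [2, 3, 4, 3, 2, 1, 2]
--     elif type_ == "E" and rank == 8:
--         return [2, 3, 4, 5, 6, 4, 2, 3]
--     else:
--         raise ValueError(f"Comarks not available for {type_}{rank}")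
--
-- def _enumerate_integrable_weights_general(type_: str, rank: int,
--                                           k: int) -> List[List[int]]:
--     """Iterative bottom-up build: a worklist of (prefix, remaining budget)
--     pairs is extended coordinate by coordinate, replacing A's recursion."""
--     comarks = _get_comarks(type_, rank)
--     partials = [([], k)]
--     for depth in range(rank):
--         cm = comarks[depth]
--         partials = [(p + [m], r - cm * m)
--                     for (p, r) in partials
--                     for m in range(r // cm + 1)]
--     return [p for p, _ in partials]
-- ===== Notes on version B (the rewrite author's own statement) =====
-- stated objective: alternative
-- what changed: The recursive depth-first backtracking over depth/remaining/current is replaced by an iterative layer-by-layer worklist: a list of (prefix, remaining-budget) pairs is rebuilt once per coordinate by an order-preserving flat expansion, with no recursion and no shared accumulator.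
-- outside the precondition, e.g. on _enumerate_integrable_weights_general('D', -3, -3): A returns [], B returns [[]]
import Mathlib
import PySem

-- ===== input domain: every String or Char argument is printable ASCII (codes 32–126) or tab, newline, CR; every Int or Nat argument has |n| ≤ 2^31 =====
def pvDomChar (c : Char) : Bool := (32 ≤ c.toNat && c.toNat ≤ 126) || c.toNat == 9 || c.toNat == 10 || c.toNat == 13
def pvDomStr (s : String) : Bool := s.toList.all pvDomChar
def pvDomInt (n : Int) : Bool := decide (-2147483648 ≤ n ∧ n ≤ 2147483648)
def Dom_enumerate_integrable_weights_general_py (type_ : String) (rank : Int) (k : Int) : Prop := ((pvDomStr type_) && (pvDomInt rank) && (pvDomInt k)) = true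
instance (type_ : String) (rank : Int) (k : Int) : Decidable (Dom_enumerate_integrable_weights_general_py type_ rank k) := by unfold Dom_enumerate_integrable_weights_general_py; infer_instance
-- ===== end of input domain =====

-- B differs from A only in control structure (iterative worklist vs recursive backtracking);
-- return values agree on all of Pre_.

-- shared helper: Python _get_comarks (used verbatim by both A and B); none = ValueError
def pvGetComarks (type_ : String) (rank : Int) : Option (List Int) :=
  if type_ = "A" then some (List.replicate rank.toNat 1)
  else if type_ = "B" then
    (if rank = 2 then some [1, 1]
     else some ([1] ++ List.replicate (rank - 2).toNat 2 ++ [1]))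
  else if type_ = "C" then some (List.replicate rank.toNat 1)
  else if type_ = "D" then
    (if rank = 4 then some [1, 2, 1, 1]
     else some ([1] ++ List.replicate (rank - 3).toNat 2 ++ [1, 1]))
  else if type_ = "G" ∧ rank = 2 then some [2, 1]
  else if type_ = "F" ∧ rank = 4 then some [2, 3, 2, 1]
  else if type_ = "E" ∧ rank = 6 then some [1, 2, 3, 2, 1, 2]
  else if type_ = "E" ∧ rank = 7 then some [2, 3, 4, 3, 2, 1, 2]
  else if type_ = "E" ∧ rank = 8 then some [2, 3, 4, 5, 6, 4, 2, 3]
  else none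

-- ===== PORT A =====
-- A's inner _recurse; fuel = rank - depth (Pre_ guarantees depth stays in range, so pyGetD's
-- default is never used inside Pre_)
def pvARec (comarks : List Int) : Nat → Int → Int → List Int → List (List Int)
  | 0, _, _, current => [current]
  | fuel+1, depth, remaining, current =>
      let cm := PySem.List.pyGetD comarks depth 0
      (PySem.List.pyRange 0 (PySem.Int.floordiv remaining cm + 1) 1).foldl
        (fun acc m => acc ++ pvARec comarks fuel (depth + 1) (remaining - cm * m) (current ++ [m])) []

def enumerate_integrable_weights_general_py (type_ : String) (rank : Int) (k : Int) : List (List Int) :=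
  match pvGetComarks type_ rank with
  | none => []   -- Python raises ValueError here (outside Pre_)
  | some comarks => pvARec comarks rank.toNat 0 k []

-- ===== PORT B =====
-- one worklist layer: extend every partial by every admissible next label m
def pvBExtend (cm : Int) (partials : List (List Int × Int)) : List (List Int × Int) :=
  partials.flatMap (fun pr =>
    (PySem.List.pyRange 0 (PySem.Int.floordiv pr.2 cm + 1) 1).map
      (fun m => (pr.1 ++ [m], pr.2 - cm * m)))

def enumerate_integrable_weights_general_py_alt (type_ : String) (rank : Int) (k : Int) : List (List Int) :=
  match pvGetComarks type_ rank with
  | none => []   -- Python raises ValueError here (outside Pre_)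
  | some comarks =>
    ((PySem.List.pyRange 0 rank 1).foldl
      (fun partials depth => pvBExtend (PySem.List.pyGetD comarks depth 0) partials)
      [([], k)]).map Prod.fst

-- ===== PRECONDITION & SPEC =====
-- Pre_ excludes the inputs outside the natural domain: unknown type/rank combinations, where A
-- raises ValueError, and negative rank, where A raises IndexError for k >= 0 and, when k < 0,
-- accidentally returns [] (the loop is empty before the bad index is reached) while B's empty
-- worklist loop yields [[]] -- both values are meaningless for a negative rank.
def Pre_enumerate_integrable_weights_general_py (type_ : String) (rank : Int) (k : Int) : Prop :=
  0 ≤ rank ∧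
  (type_ = "A" ∨ type_ = "B" ∨ type_ = "C" ∨ type_ = "D" ∨
   (type_ = "G" ∧ rank = 2) ∨ (type_ = "F" ∧ rank = 4) ∨
   (type_ = "E" ∧ (rank = 6 ∨ rank = 7 ∨ rank = 8)))

instance (type_ : String) (rank : Int) (k : Int) : Decidable (Pre_enumerate_integrable_weights_general_py type_ rank k) := by
  unfold Pre_enumerate_integrable_weights_general_py; infer_instance

def pvWitness_enumerate_integrable_weights_general_py : String × Int × Int := ("A", 2, 2)

def Spec_enumerate_integrable_weights_general_py (type_ : String) (rank : Int) (k : Int) (out : List (List Int)) : Prop := out = enumerate_integrable_weights_general_py_alt type_ rank k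
instance (type_ : String) (rank : Int) (k : Int) (out : List (List Int)) : Decidable (Spec_enumerate_integrable_weights_general_py type_ rank k out) := by unfold Spec_enumerate_integrable_weights_general_py; infer_instance

-- ===== CLAIM (what is proved, stated in full; the proofs are below) =====
def Claim_equal_enumerate_integrable_weights_general_py : Prop := ∀ (type_ : String) (rank : Int) (k : Int), Dom_enumerate_integrable_weights_general_py type_ rank k → Pre_enumerate_integrable_weights_general_py type_ rank k → Spec_enumerate_integrable_weights_general_py type_ rank k (enumerate_integrable_weights_general_py type_ rank k)

-- ===== LEMMAS AND PROOFS =====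

-- common reference form: depth-first enumeration along a list of comarks
def pvDfs : List Int → Int → List Int → List (List Int)
  | [], _, cur => [cur]
  | c :: rest, rem, cur =>
      (PySem.List.pyRange 0 (PySem.Int.floordiv rem c + 1) 1).flatMap
        (fun m => pvDfs rest (rem - c * m) (cur ++ [m]))

-- Pre_ guarantees the comark table exists and covers all rank coordinates
theorem pvComarks_long (type_ : String) (rank : Int) (k : Int)
    (h : Pre_enumerate_integrable_weights_general_py type_ rank k) :
    ∃ cs, pvGetComarks type_ rank = some cs ∧ rank.toNat ≤ cs.length := by
  obtain ⟨hr, hty⟩ := h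
  rcases hty with h1 | h1 | h1 | h1 | ⟨h1, h2⟩ | ⟨h1, h2⟩ | ⟨h1, h2 | h2 | h2⟩ <;> subst h1
  · exact ⟨List.replicate rank.toNat 1, by simp [pvGetComarks], by simp⟩
  · by_cases h2 : rank = 2
    · exact ⟨[1, 1], by simp [pvGetComarks, h2], by simp; omega⟩
    · exact ⟨[1] ++ List.replicate (rank - 2).toNat 2 ++ [1],
        by simp [pvGetComarks, h2], by simp; omega⟩
  · exact ⟨List.replicate rank.toNat 1, by simp [pvGetComarks], by simp⟩
  · by_cases h2 : rank = 4
    · exact ⟨[1, 2, 1, 1], by simp [pvGetComarks, h2], by simp; omega⟩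
    · exact ⟨[1] ++ List.replicate (rank - 3).toNat 2 ++ [1, 1],
        by simp [pvGetComarks, h2], by simp; omega⟩
  all_goals subst h2
  · exact ⟨[2, 1], by simp [pvGetComarks], by simp⟩
  · exact ⟨[2, 3, 2, 1], by simp [pvGetComarks], by simp⟩
  · exact ⟨[1, 2, 3, 2, 1, 2], by simp [pvGetComarks], by simp⟩
  · exact ⟨[2, 3, 4, 3, 2, 1, 2], by simp [pvGetComarks], by simp⟩
  · exact ⟨[2, 3, 4, 5, 6, 4, 2, 3], by simp [pvGetComarks], by simp⟩

theorem pvARec_eq_dfs (cs : List Int) (fuel : Nat) (d rem : Int) (cur : List Int)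
    (hd : 0 ≤ d) (hlen : d.toNat + fuel ≤ cs.length) :
    pvARec cs fuel d rem cur = pvDfs ((cs.drop d.toNat).take fuel) rem cur := by
  induction fuel generalizing d rem cur with
  | zero => simp [pvARec, pvDfs]
  | succ f ih =>
    have hlt : d.toNat < cs.length := by omega
    have hdrop : cs.drop d.toNat = cs[d.toNat] :: cs.drop (d.toNat + 1) :=
      List.drop_eq_getElem_cons hlt
    rw [pvARec, hdrop, List.take_succ_cons, pvDfs]
    rw [PySem.List.foldl_append_eq_flatMap]
    have hget : PySem.List.pyGetD cs d 0 = cs[d.toNat] :=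
      by rw [PySem.List.pyGetD_eq_getElem] <;> omega
    rw [hget]
    simp only [List.nil_append]
    apply List.flatMap_congr
    intro m _
    have h1 : (d + 1).toNat = d.toNat + 1 := by omega
    rw [ih (d + 1) _ _ (by omega) (by omega), h1]

theorem pvBLayers_eq_dfs (cs : List Int) (n : Nat) (d : Int)
    (P : List (List Int × Int)) (hd : 0 ≤ d) (hlen : d.toNat + n ≤ cs.length) :
    ((PySem.List.pyRange d (d + n) 1).foldl
        (fun partials depth => pvBExtend (PySem.List.pyGetD cs depth 0) partials) P).map Prod.fst
      = P.flatMap (fun pr => pvDfs ((cs.drop d.toNat).take n) pr.2 pr.1) := by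
  induction n generalizing d P with
  | zero =>
    rw [PySem.List.pyRange_one_eq_nil (by omega)]
    induction P with
    | nil => simp
    | cons p Ps ihp => simp_all [pvDfs]
  | succ f ih =>
    have hcons : PySem.List.pyRange d (d + (f + 1 : Nat)) 1
        = d :: PySem.List.pyRange (d + 1) (d + (f + 1 : Nat)) 1 :=
      PySem.List.pyRange_one_cons (by push_cast; omega)
    have harg : d + ((f + 1 : Nat) : Int) = (d + 1) + (f : Int) := by push_cast; omega
    rw [hcons, List.foldl_cons, harg, ih (d + 1) _ (by omega) (by omega)]
    have hlt : d.toNat < cs.length := by omega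
    have hdrop : cs.drop d.toNat = cs[d.toNat] :: cs.drop (d.toNat + 1) :=
      List.drop_eq_getElem_cons hlt
    have h1 : (d + 1).toNat = d.toNat + 1 := by omega
    rw [h1, hdrop, List.take_succ_cons]
    have hget : PySem.List.pyGetD cs d 0 = cs[d.toNat] :=
      by rw [PySem.List.pyGetD_eq_getElem] <;> omega
    rw [pvBExtend, hget, List.flatMap_assoc]
    apply List.flatMap_congr
    intro pr _
    rw [pvDfs, List.flatMap_def, List.map_map]
    rfl

-- ===== VERDICT (by name: the statement is the Claim_ definition above) =====
theorem enumerate_integrable_weights_general_py_spec : Claim_equal_enumerate_integrable_weights_general_py := by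
  intro type_ rank k _ hpre
  obtain ⟨cs, hcs, hlen⟩ := pvComarks_long type_ rank k hpre
  unfold Spec_enumerate_integrable_weights_general_py
  have h0 : 0 ≤ rank := hpre.1
  have hr : (0 : Int) + (rank.toNat : Int) = rank := by omega
  have hA : enumerate_integrable_weights_general_py type_ rank k = pvARec cs rank.toNat 0 k [] := by
    simp [enumerate_integrable_weights_general_py, hcs]
  have hB : enumerate_integrable_weights_general_py_alt type_ rank k
      = ((PySem.List.pyRange 0 rank 1).foldl
          (fun partials depth => pvBExtend (PySem.List.pyGetD cs depth 0) partials)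
          [([], k)]).map Prod.fst := by
    simp [enumerate_integrable_weights_general_py_alt, hcs]
  rw [hA, hB]
  rw [pvARec_eq_dfs cs rank.toNat 0 k [] le_rfl (by simpa using hlen)]
  rw [show PySem.List.pyRange 0 rank 1 = PySem.List.pyRange 0 (0 + (rank.toNat : Int)) 1 by rw [hr]]
  rw [pvBLayers_eq_dfs cs rank.toNat 0 _ le_rfl (by simpa using hlen)]
  simp
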